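-- pv_equiv track=rewrite | github.com/chance-hwa/study | algorithm/arrange_dna_sequence.py | count_and_sort_sequence
-- ===== SOURCE A (Python) =====
-- def count_and_sort_sequence(sequence):
--     counter = {"A": 0, "T": 0, "G": 0, "C": 0}
--
--     for nucleotide in sequence:
--         counter[nucleotide] += 1
--
--     index = 0
--     for nucleotide in "ATGC":
--         while counter[nucleotide] > 0:
--             sequence[index] = nucleotide
--             counter[nucleotide] -= 1
--             index += 1
--
--     return sequence
-- ===== SOURCE B (Python) =====
-- def count_and_sort_sequence(sequence):
--     order = {"A": 0, "T": 1, "G": 2, "C": 3}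
--     sequence.sort(key=lambda n: order[n])
--     return sequence
-- ===== Notes on version B (the rewrite author's own statement) =====
-- stated objective: idiomatic
-- what changed: Replaces the count-then-overwrite counting sort with an in-place stable comparison sort keyed by a nucleotide-order dict (list.sort with key), keeping the same in-place mutation and the same KeyError on invalid nucleotides.
import Mathlib
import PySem

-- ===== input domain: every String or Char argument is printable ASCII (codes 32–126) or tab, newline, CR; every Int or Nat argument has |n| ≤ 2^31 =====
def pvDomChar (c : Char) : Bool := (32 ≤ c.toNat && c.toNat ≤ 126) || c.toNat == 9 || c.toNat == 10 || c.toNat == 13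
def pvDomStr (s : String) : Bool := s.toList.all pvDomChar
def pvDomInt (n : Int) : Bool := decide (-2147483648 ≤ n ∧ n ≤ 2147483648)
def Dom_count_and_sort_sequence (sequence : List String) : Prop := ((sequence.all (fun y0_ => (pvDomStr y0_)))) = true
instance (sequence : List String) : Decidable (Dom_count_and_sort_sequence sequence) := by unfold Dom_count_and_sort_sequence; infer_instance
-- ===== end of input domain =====

-- B replaces A's count-then-overwrite counting sort by an idiomatic in-place stable
-- comparison sort keyed by a nucleotide-order dict; both mutate `sequence` in place in
-- Python (the theorems here are about the returned value).


-- ===== PORT A =====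
-- the while loop `while counter[nucleotide] > 0: sequence[index] = nucleotide; …`:
-- one run of writes of the same nucleotide (on Pre_ every written index is in range,
-- so List.set is exact for `sequence[index] = …`)
def writeRun (seq : List String) (index : Nat) (n : String) (cnt : Int) : List String × Nat :=
  if 0 < cnt then writeRun (seq.set index n) (index + 1) n (cnt - 1) else (seq, index)
termination_by cnt.toNat
decreasing_by omega

def count_and_sort_sequence (sequence : List String) : List String :=
  let counter : PySem.Dict String Int :=
    PySem.Dict.ofList [("A", 0), ("T", 0), ("G", 0), ("C", 0)]
  -- `counter[nucleotide] += 1` (KeyError on a nucleotide outside "ATGC" → excluded by Pre_)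
  let counter := sequence.foldl (fun c n => c.modify n 0 (· + 1)) counter
  -- `for nucleotide in "ATGC"` iterates the one-character strings "A","T","G","C"
  let st := (["A", "T", "G", "C"] : List String).foldl
    (fun (st : List String × Nat) n => writeRun st.1 st.2 n (counter.getD n 0)) (sequence, 0)
  st.1

-- ===== PORT B =====
def count_and_sort_sequence_alt (sequence : List String) : List String :=
  let order : PySem.Dict String Int :=
    PySem.Dict.ofList [("A", 0), ("T", 1), ("G", 2), ("C", 3)]
  -- `order[n]` raises KeyError outside "ATGC" (excluded by Pre_); default 4 unreachable there
  PySem.List.sorted sequence (fun n => order.getD n 4) false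

-- ===== PRECONDITION & SPEC =====
-- Pre_ excludes exactly the inputs on which the Python A raises KeyError
-- (an element that is not one of "A","T","G","C"); B raises KeyError there too.
def Pre_count_and_sort_sequence (sequence : List String) : Prop :=
  ∀ x ∈ sequence, x = "A" ∨ x = "T" ∨ x = "G" ∨ x = "C"
instance (sequence : List String) : Decidable (Pre_count_and_sort_sequence sequence) := by
  unfold Pre_count_and_sort_sequence; infer_instance
def pvWitness_count_and_sort_sequence : List String := ["G", "A", "C", "T", "A"]
def Spec_count_and_sort_sequence (sequence : List String) (out : List String) : Prop := out = count_and_sort_sequence_alt sequence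
instance (sequence : List String) (out : List String) : Decidable (Spec_count_and_sort_sequence sequence out) := by unfold Spec_count_and_sort_sequence; infer_instance

-- ===== CLAIM (what is proved, stated in full; the proofs are below) =====
def Claim_equal_count_and_sort_sequence : Prop := ∀ (sequence : List String), Dom_count_and_sort_sequence sequence → Pre_count_and_sort_sequence sequence → Spec_count_and_sort_sequence sequence (count_and_sort_sequence sequence)

-- ===== LEMMAS AND PROOFS =====

-- the common canonical value: all "A"s, then all "T"s, "G"s, "C"s
def canon (a t g c : Nat) : List String :=
  List.replicate a "A" ++ List.replicate t "T" ++ List.replicate g "G" ++ List.replicate c "C"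

theorem writeRun_spec (n : String) (k : Nat) :
    ∀ (seq : List String) (i : Nat), i + k ≤ seq.length →
    writeRun seq i n (k : Int) =
      (seq.take i ++ List.replicate k n ++ seq.drop (i + k), i + k) := by
  induction k with
  | zero =>
    intro seq i h
    unfold writeRun
    simp
  | succ m ih =>
    intro seq i h
    unfold writeRun
    have hpos : (0 : Int) < ((m + 1 : Nat) : Int) := by positivity
    rw [if_pos hpos]
    have hlt : i < seq.length := by omega
    have hcast : ((m + 1 : Nat) : Int) - 1 = (m : Int) := by push_cast; ring
    rw [hcast, ih (seq.set i n) (i + 1) (by simpa using by omega)]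
    rw [Prod.mk.injEq]
    have hset : seq.set i n = seq.take i ++ n :: seq.drop (i + 1) := by
      rw [List.set_eq_take_append_cons_drop, if_pos hlt]
    refine ⟨?_, by omega⟩
    rw [hset]
    have h1 : (seq.take i).length = i := List.length_take_of_le (by omega)
    have htk : (seq.take i ++ n :: seq.drop (i + 1)).take (i + 1)
        = seq.take i ++ [n] := by
      rw [List.take_append, h1]
      simp
    have hdp : (seq.take i ++ n :: seq.drop (i + 1)).drop (i + 1 + m)
        = seq.drop (i + (m + 1)) := by
      rw [List.drop_append, h1]
      have e2 : i + 1 + m - i = m + 1 := by omega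
      rw [e2, List.drop_eq_nil_of_le (by rw [h1]; omega), List.nil_append,
        List.drop_succ_cons, List.drop_drop]
      congr 1
      omega
    rw [htk, hdp]
    simp [List.replicate_succ]

theorem counts_fill (s : List String) (h : ∀ x ∈ s, x = "A" ∨ x = "T" ∨ x = "G" ∨ x = "C") :
    s.count "A" + s.count "T" + s.count "G" + s.count "C" = s.length := by
  induction s with
  | nil => simp
  | cons y ys ih =>
    have hy := h y (by simp)
    have hys : ∀ x ∈ ys, x = "A" ∨ x = "T" ∨ x = "G" ∨ x = "C" :=
      fun x hx => h x (by simp [hx])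
    have hh := ih hys
    rcases hy with h1 | h1 | h1 | h1 <;> subst h1 <;> simp <;> omega

theorem portA_canon (s : List String)
    (h : ∀ x ∈ s, x = "A" ∨ x = "T" ∨ x = "G" ∨ x = "C") :
    count_and_sort_sequence s = canon (s.count "A") (s.count "T") (s.count "G") (s.count "C") := by
  unfold count_and_sort_sequence
  have hgd : ∀ v : String,
      (s.foldl (fun c n => c.modify n 0 (· + 1))
        (PySem.Dict.ofList [("A", 0), ("T", 0), ("G", 0), ("C", 0)])).getD v 0
      = (PySem.Dict.ofList [("A", (0:Int)), ("T", 0), ("G", 0), ("C", 0)]).getD v 0 + s.count v :=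
    fun v => PySem.Dict.getD_foldl_modify_add_one s _ v
  have hA := hgd "A"; have hT := hgd "T"; have hG := hgd "G"; have hC := hgd "C"
  have e0 : (PySem.Dict.ofList [("A", (0:Int)), ("T", 0), ("G", 0), ("C", 0)]).getD "A" 0 = 0 := by decide
  have e1 : (PySem.Dict.ofList [("A", (0:Int)), ("T", 0), ("G", 0), ("C", 0)]).getD "T" 0 = 0 := by decide
  have e2 : (PySem.Dict.ofList [("A", (0:Int)), ("T", 0), ("G", 0), ("C", 0)]).getD "G" 0 = 0 := by decide
  have e3 : (PySem.Dict.ofList [("A", (0:Int)), ("T", 0), ("G", 0), ("C", 0)]).getD "C" 0 = 0 := by decide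
  rw [e0] at hA; rw [e1] at hT; rw [e2] at hG; rw [e3] at hC
  simp only [List.foldl_cons, List.foldl_nil]
  rw [hA, hT, hG, hC]
  simp only [zero_add]
  set a := s.count "A"
  set t := s.count "T"
  set g := s.count "G"
  set c := s.count "C"
  have hsum : a + t + g + c = s.length := counts_fill s h
  -- step 1: write the "A"s
  rw [writeRun_spec "A" a s 0 (by omega)]
  have l1 : (s.take 0 ++ List.replicate a "A" ++ s.drop (0 + a)).length = s.length := by
    simp; omega
  -- step 2
  rw [writeRun_spec "T" t _ _ (by rw [l1]; omega)]
  simp only [List.take_zero, List.nil_append, Nat.zero_add]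
  have htk2 : (List.replicate a "A" ++ s.drop a).take a = List.replicate a "A" :=
    List.take_left' (by simp)
  have hdp2 : (List.replicate a "A" ++ s.drop a).drop (a + t) = s.drop (a + t) := by
    rw [List.drop_append]
    have e : List.drop (a + t) (List.replicate a "A") = [] :=
      List.drop_eq_nil_of_le (by simp)
    rw [e, List.nil_append, List.drop_drop]
    congr 1
    simp only [List.length_replicate]
    omega
  rw [htk2, hdp2]
  -- step 3
  rw [writeRun_spec "G" g _ _ (by simp; omega)]
  have htk3 : (List.replicate a "A" ++ List.replicate t "T" ++ s.drop (a + t)).take (a + t)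
      = List.replicate a "A" ++ List.replicate t "T" :=
    List.take_left' (by simp)
  have hdp3 : (List.replicate a "A" ++ List.replicate t "T" ++ s.drop (a + t)).drop (a + t + g)
      = s.drop (a + t + g) := by
    rw [List.drop_append]
    have e : List.drop (a + t + g) (List.replicate a "A" ++ List.replicate t "T") = [] :=
      List.drop_eq_nil_of_le (by simp)
    rw [e, List.nil_append, List.drop_drop]
    congr 1
    simp only [List.length_append, List.length_replicate]
    omega
  rw [htk3, hdp3]
  -- step 4
  rw [writeRun_spec "C" c _ _ (by simp; omega)]
  have htk4 : (List.replicate a "A" ++ List.replicate t "T" ++ List.replicate g "G"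
        ++ s.drop (a + t + g)).take (a + t + g)
      = List.replicate a "A" ++ List.replicate t "T" ++ List.replicate g "G" :=
    List.take_left' (by simp; omega)
  have hdp4 : (List.replicate a "A" ++ List.replicate t "T" ++ List.replicate g "G"
        ++ s.drop (a + t + g)).drop (a + t + g + c) = [] := by
    rw [List.drop_append]
    have e : List.drop (a + t + g + c)
        (List.replicate a "A" ++ List.replicate t "T" ++ List.replicate g "G") = [] :=
      List.drop_eq_nil_of_le (by simp; omega)
    rw [e, List.nil_append, List.drop_drop]
    apply List.drop_eq_nil_of_le
    simp only [List.length_append, List.length_replicate]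
    omega
  rw [htk4, hdp4]
  simp [canon]

-- the comparison used by port B's insertion sort
def keyB (n : String) : Int :=
  (PySem.Dict.ofList [("A", (0:Int)), ("T", 1), ("G", 2), ("C", 3)]).getD n 4

def beforeB (a b : String) : Bool := decide (keyB a < keyB b)

theorem insertBy_front {α : Type} (before : α → α → Bool) (x : α) (l : List α)
    (h : ∀ y ∈ l, before x y = true) :
    PySem.List.insertBy before x l = x :: l := by
  cases l with
  | nil => rfl
  | cons y ys =>
    rw [show PySem.List.insertBy before x (y :: ys)
        = if before x y = true then x :: y :: ys else y :: PySem.List.insertBy before x ys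
      from rfl]
    simp [h y (by simp)]

theorem insertBy_skip_replicate {α : Type} (before : α → α → Bool) (x y : α) (n : Nat)
    (l : List α) (h : before x y = false) :
    PySem.List.insertBy before x (List.replicate n y ++ l)
      = List.replicate n y ++ PySem.List.insertBy before x l := by
  induction n with
  | zero => simp
  | succ m ih =>
    rw [List.replicate_succ]
    simp only [List.cons_append]
    rw [show PySem.List.insertBy before x (y :: (List.replicate m y ++ l))
        = if before x y = true then x :: y :: (List.replicate m y ++ l)
          else y :: PySem.List.insertBy before x (List.replicate m y ++ l)
      from rfl]
    simp [h, ih]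

theorem replicate_append_cons {α : Type} (n : Nat) (x : α) (l : List α) :
    List.replicate n x ++ x :: l = x :: (List.replicate n x ++ l) := by
  induction n with
  | zero => simp
  | succ m ih => simp [List.replicate_succ, ih]

theorem foldlB_canon (s : List String)
    (h : ∀ x ∈ s, x = "A" ∨ x = "T" ∨ x = "G" ∨ x = "C") :
    s.foldl (fun acc x => PySem.List.insertBy beforeB x acc) []
      = canon (s.count "A") (s.count "T") (s.count "G") (s.count "C") := by
  induction s using List.reverseRecOn with
  | nil => simp [canon]
  | append_singleton ys x ih =>
    have hys : ∀ z ∈ ys, z = "A" ∨ z = "T" ∨ z = "G" ∨ z = "C" :=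
      fun z hz => h z (by simp [hz])
    have hx := h x (by simp)
    rw [List.foldl_append, List.foldl_cons, List.foldl_nil, ih hys]
    rcases hx with h1 | h1 | h1 | h1 <;> subst h1
    · -- insert "A": goes right after the "A" block
      unfold canon
      simp only [List.append_assoc]
      rw [insertBy_skip_replicate beforeB "A" "A" _ _ (by decide),
        insertBy_front beforeB "A" _ (by
          intro y hy
          simp only [List.mem_append, List.mem_replicate] at hy
          rcases hy with ⟨_, rfl⟩ | ⟨_, rfl⟩ | ⟨_, rfl⟩ <;> decide)]
      simp [List.count_append, replicate_append_cons, List.replicate_succ]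
    · -- insert "T"
      unfold canon
      simp only [List.append_assoc]
      rw [insertBy_skip_replicate beforeB "T" "A" _ _ (by decide),
        insertBy_skip_replicate beforeB "T" "T" _ _ (by decide),
        insertBy_front beforeB "T" _ (by
          intro y hy
          simp only [List.mem_append, List.mem_replicate] at hy
          rcases hy with ⟨_, rfl⟩ | ⟨_, rfl⟩ <;> decide)]
      simp [List.count_append, replicate_append_cons, List.replicate_succ]
    · -- insert "G"
      unfold canon
      simp only [List.append_assoc]
      rw [insertBy_skip_replicate beforeB "G" "A" _ _ (by decide),
        insertBy_skip_replicate beforeB "G" "T" _ _ (by decide),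
        insertBy_skip_replicate beforeB "G" "G" _ _ (by decide),
        insertBy_front beforeB "G" _ (by
          intro y hy
          simp only [List.mem_replicate] at hy
          rw [hy.2]; decide)]
      simp [List.count_append, replicate_append_cons, List.replicate_succ]
    · -- insert "C"
      unfold canon
      simp only [List.append_assoc]
      rw [insertBy_skip_replicate beforeB "C" "A" _ _ (by decide),
        insertBy_skip_replicate beforeB "C" "T" _ _ (by decide),
        insertBy_skip_replicate beforeB "C" "G" _ _ (by decide),
        ← List.append_nil (List.replicate (List.count "C" ys) "C"),
        insertBy_skip_replicate beforeB "C" "C" _ _ (by decide)]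
      simp [PySem.List.insertBy, List.count_append, replicate_append_cons, List.replicate_succ]

theorem portB_canon (s : List String)
    (h : ∀ x ∈ s, x = "A" ∨ x = "T" ∨ x = "G" ∨ x = "C") :
    count_and_sort_sequence_alt s
      = canon (s.count "A") (s.count "T") (s.count "G") (s.count "C") := by
  have hrw : count_and_sort_sequence_alt s
      = s.foldl (fun acc x => PySem.List.insertBy beforeB x acc) [] :=
    PySem.List.sorted_eq_foldl_insertBy s _
  rw [hrw, foldlB_canon s h]

-- ===== VERDICT (by name: the statement is the Claim_ definition above) =====
theorem count_and_sort_sequence_spec : Claim_equal_count_and_sort_sequence := by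
  intro s _ hpre
  unfold Spec_count_and_sort_sequence
  rw [portA_canon s hpre, portB_canon s hpre]
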